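-- pv_equiv track=rewrite | github.com/bubbletea03/BAEKJOON | 2011 (DP) - 2시간동안 했는데 벽느낌.py | func
-- ===== SOURCE A (Python) =====
-- def func(n):
--
--     # 편의상 인덱스 1부터 시작, 기본값 1
--     dp = [1] * (n+1)
--     dp[2] = 2
--     if(n>2):
--         dp[3] = 3
--
--     for i in range(4, n+1):
--         for row in range(1, n):
--             if(row >= i-2):
--                 dp[i] += 1
--             else:
--                 dp[i] += dp[i-1-row]
--
--     return dp[n]
-- ===== SOURCE B (Python) =====
-- def func(n):
--     # O(n): dp[i] = (n-i+3) + sum(dp[2..i-2]); keep a running prefix sum.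
--     if n <= 3:
--         return n
--     prev, prefix = 3, 2   # prev = dp[3], prefix = dp[2]
--     for i in range(4, n + 1):
--         cur = n - i + 3 + prefix
--         prefix += prev
--         prev = cur
--     return prev
-- ===== Notes on version B (the rewrite author's own statement) =====
-- stated objective: faster
-- what changed: A fills dp[4..n] by re-scanning all n-1 rows for each i (adding dp[i-1-row] or 1 per row); B computes each dp[i] in O(1) as (n-i+3) + running prefix sum of dp[2..i-2], maintained incrementally in a single loop.
import Mathlib
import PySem

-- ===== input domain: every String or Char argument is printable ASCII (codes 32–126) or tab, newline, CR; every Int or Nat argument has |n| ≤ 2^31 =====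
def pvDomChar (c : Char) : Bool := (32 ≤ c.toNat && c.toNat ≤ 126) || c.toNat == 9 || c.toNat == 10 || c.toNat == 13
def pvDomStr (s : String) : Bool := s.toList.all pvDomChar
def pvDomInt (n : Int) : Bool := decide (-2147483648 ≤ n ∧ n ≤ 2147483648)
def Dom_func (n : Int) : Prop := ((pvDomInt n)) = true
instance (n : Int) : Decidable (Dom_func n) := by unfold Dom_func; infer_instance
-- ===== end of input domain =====

-- B replaces A's nested accumulation loop by a single loop carrying a running prefix sum.

-- ===== PORT A =====
-- body of the inner 'for row in range(1, n)' loop: dp[i] += 1  /  dp[i] += dp[i-1-row]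
def innerBody (i : Int) (dp : List Int) (row : Int) : List Int :=
  dp.set i.toNat (dp.getD i.toNat 0 + (if row ≥ i - 2 then 1 else dp.getD (i - 1 - row).toNat 0))

-- body of the outer 'for i in range(4, n+1)' loop
def outerBody (n : Int) (dp : List Int) (i : Int) : List Int :=
  (PySem.List.pyRange 1 n 1).foldl (innerBody i) dp

def func (n : Int) : Int :=
  -- dp = [1]*(n+1); dp[2] = 2; if n > 2: dp[3] = 3; the nested loops; return dp[n]
  ((PySem.List.pyRange 4 (n + 1) 1).foldl (outerBody n)
    (if 2 < n then ((List.replicate (n + 1).toNat (1 : Int)).set 2 2).set 3 3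
     else (List.replicate (n + 1).toNat (1 : Int)).set 2 2)).getD n.toNat 0

-- ===== PORT B =====
def func_alt (n : Int) : Int :=
  if n ≤ 3 then n
  else
    ((PySem.List.pyRange 4 (n + 1) 1).foldl
      (fun (st : Int × Int) i => (n - i + 3 + st.2, st.2 + st.1)) (3, 2)).1

-- ===== PRECONDITION & SPEC =====
-- Pre_ excludes n < 2, where Python A raises IndexError on 'dp[2] = 2'.
def Pre_func (n : Int) : Prop := 2 ≤ n
instance (n : Int) : Decidable (Pre_func n) := by unfold Pre_func; infer_instance

def pvWitness_func : Int := 5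

def Spec_func (n : Int) (out : Int) : Prop := out = func_alt n
instance (n : Int) (out : Int) : Decidable (Spec_func n out) := by unfold Spec_func; infer_instance

-- ===== CLAIM (what is proved, stated in full; the proofs are below) =====
def Claim_equal_func : Prop := ∀ (n : Int), Dom_func n → Pre_func n → Spec_func n (func n)

-- ===== LEMMAS AND PROOFS =====

-- B's loop as a structural recursion on the number of iterations
def bfold (n : Int) : Nat → Int × Int
  | 0 => (3, 2)
  | m + 1 => ((n - (4 + (m : Int)) + 3 + (bfold n m).2, (bfold n m).2 + (bfold n m).1))

-- the reference sequence: d n j is the settled value of dp[j]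
def d (n : Int) (j : Nat) : Int :=
  if j ≤ 1 then 1 else if j = 2 then 2 else (bfold n (j - 3)).1

-- partial sums: sum2 n m = d n 2 + … + d n (m+1)
def sum2 (n : Int) : Nat → Int
  | 0 => 0
  | m + 1 => sum2 n m + d n (m + 2)

lemma bfold_fst (n : Int) (m : Nat) : (bfold n m).1 = d n (m + 3) := by
  cases m with
  | zero => simp [bfold, d]
  | succ m => simp [d, bfold]

lemma bfold_snd (n : Int) (m : Nat) : (bfold n m).2 = sum2 n (m + 1) := by
  induction m with
  | zero => simp [bfold, sum2, d]
  | succ m ih =>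
      show (bfold n m).2 + (bfold n m).1 = sum2 n (m + 2)
      rw [ih, bfold_fst]; rfl

lemma d_rec (n : Int) (m : Nat) : d n (m + 4) = n - (4 + (m : Int)) + 3 + sum2 n (m + 1) := by
  have h : d n (m + 4) = (bfold n (m + 1)).1 := by simp [d]
  rw [h]
  show n - (4 + (m : Int)) + 3 + (bfold n m).2 = _
  rw [bfold_snd]

lemma set_getD_self (dp : List Int) (i : Nat) : dp.set i (dp.getD i 0) = dp := by
  apply List.ext_getElem?
  intro j
  rw [List.getElem?_set]
  split_ifs with h1 h2
  · subst h1
    rw [List.getD_eq_getElem?_getD, List.getElem?_eq_getElem h2]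
    rfl
  · subst h1
    exact (List.getElem?_eq_none (by omega)).symm
  · rfl

lemma getD_set_ne (dp : List Int) (i j : Nat) (v : Int) (h : j ≠ i) :
    (dp.set i v).getD j 0 = dp.getD j 0 := by
  rw [List.getD_eq_getElem?_getD, List.getD_eq_getElem?_getD,
    List.getElem?_set_ne (fun hh => h hh.symm)]

lemma getD_set_self (dp : List Int) (i : Nat) (v : Int) (h : i < dp.length) :
    (dp.set i v).getD i 0 = v := by
  rw [List.getD_eq_getElem?_getD, List.getElem?_set_self h]; rfl

-- the inner loop only writes index i and reads indices below i, so it adds the whole sum at once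
lemma inner_fold (i : Int) (hi : 1 ≤ i) (R : List Int) (hR : ∀ r ∈ R, 1 ≤ r) (dp : List Int) :
    R.foldl (innerBody i) dp
    = dp.set i.toNat (dp.getD i.toNat 0 +
        (R.map (fun row => if row ≥ i - 2 then 1 else dp.getD (i - 1 - row).toNat 0)).sum) := by
  induction R generalizing dp with
  | nil =>
      simp only [List.foldl_nil, List.map_nil, List.sum_nil, add_zero, set_getD_self]
  | cons r R ih =>
      have hr : 1 ≤ r := hR r (by simp)
      by_cases hlen : i.toNat < dp.length
      · simp only [List.foldl_cons]
        rw [ih (fun x hx => hR x (by simp [hx]))]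
        show (innerBody i dp r).set i.toNat _ = _
        have hset : innerBody i dp r
            = dp.set i.toNat (dp.getD i.toNat 0 + (if r ≥ i - 2 then 1 else dp.getD (i - 1 - r).toNat 0)) := rfl
        have hgd : (innerBody i dp r).getD i.toNat 0
            = dp.getD i.toNat 0 + (if r ≥ i - 2 then 1 else dp.getD (i - 1 - r).toNat 0) := by
          rw [hset, getD_set_self _ _ _ hlen]
        have hmap : R.map (fun row => if row ≥ i - 2 then 1 else (innerBody i dp r).getD (i - 1 - row).toNat 0)
            = R.map (fun row => if row ≥ i - 2 then 1 else dp.getD (i - 1 - row).toNat 0) := by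
          apply List.map_congr_left
          intro row hrow
          have hrow1 : 1 ≤ row := hR row (by simp [hrow])
          by_cases hc : row ≥ i - 2
          · simp [hc]
          · have hne : (i - 1 - row).toNat ≠ i.toNat := by omega
            simp only [hc, if_false, hset, getD_set_ne _ _ _ _ hne]
        rw [hgd, hmap, hset, List.set_set, List.map_cons, List.sum_cons]
        ring_nf
      · have hle : dp.length ≤ i.toNat := by omega
        have hstep : innerBody i dp r = dp := List.set_eq_of_length_le hle
        simp only [List.foldl_cons, hstep]
        rw [ih (fun x hx => hR x (by simp [hx])),
          List.set_eq_of_length_le hle, List.set_eq_of_length_le hle]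

-- the reversed read of the settled prefix equals the running prefix sum
lemma part1_sum (n : Int) (m : Nat) :
    ((List.range (m + 1)).map (fun k => d n (m + 2 - k))).sum = sum2 n (m + 1) := by
  induction m with
  | zero => simp [sum2, List.range_succ]
  | succ m ih =>
      rw [List.range_succ_eq_map]
      simp only [List.map_cons, List.map_map, List.sum_cons]
      have : (List.range (m + 1)).map ((fun k => d n (m + 3 - k)) ∘ Nat.succ)
          = (List.range (m + 1)).map (fun k => d n (m + 2 - k)) := by
        apply List.map_congr_left
        intro k hk
        simp only [Function.comp]
        congr 1
        omega
      rw [this, ih]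
      show d n (m + 3) + sum2 n (m + 1) = sum2 n (m + 1) + d n (m + 3)
      ring

-- one outer iteration, assuming all entries below are settled
lemma outer_step (n : Int) (hn : 4 ≤ n) (m : Nat) (hm : (m : Int) ≤ n - 4) (dp : List Int)
    (hdp : ∀ j, j < (n + 1).toNat → dp.getD j 0 = if j ≤ m + 3 then d n j else 1) :
    outerBody n dp (4 + (m : Int)) = dp.set (m + 4) (d n (m + 4)) := by
  have hR : ∀ r ∈ PySem.List.pyRange 1 n 1, (1 : Int) ≤ r := by
    intro r hr
    exact ((PySem.List.mem_pyRange_one).1 hr).1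
  have htn : (4 + (m : Int)).toNat = m + 4 := by omega
  rw [outerBody, inner_fold _ (by omega) _ hR, htn]
  have hm4lt : m + 4 < (n + 1).toNat := by omega
  have hcur : dp.getD (m + 4) 0 = 1 := by
    rw [hdp _ hm4lt]
    simp only [if_neg (by omega : ¬ (m + 4 ≤ m + 3))]
  -- split the row range at m+2
  rw [PySem.List.pyRange_one_append 1 ((m : Int) + 2) n (by omega) (by omega),
    List.map_append, List.sum_append]
  -- low rows: read the settled prefix
  have hlow : ((PySem.List.pyRange 1 ((m : Int) + 2) 1).map
        (fun row => if row ≥ 4 + (m : Int) - 2 then 1 else dp.getD (4 + (m : Int) - 1 - row).toNat 0)).sum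
      = sum2 n (m + 1) := by
    have h1 : ((PySem.List.pyRange 1 ((m : Int) + 2) 1).map
          (fun row => if row ≥ 4 + (m : Int) - 2 then 1 else dp.getD (4 + (m : Int) - 1 - row).toNat 0))
        = (PySem.List.pyRange 1 ((m : Int) + 2) 1).map
          (fun row => dp.getD (4 + (m : Int) - 1 - row).toNat 0) := by
      apply List.map_congr_left
      intro row hrow
      obtain ⟨h1, h2⟩ := (PySem.List.mem_pyRange_one).1 hrow
      simp only [if_neg (by omega : ¬ (row ≥ 4 + (m : Int) - 2))]
    rw [h1, PySem.List.pyRange_one]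
    have h2 : ((m : Int) + 2 - 1).toNat = m + 1 := by omega
    rw [h2, List.map_map]
    have h3 : (List.range (m + 1)).map ((fun row => dp.getD (4 + (m : Int) - 1 - row).toNat 0) ∘ (fun k : Nat => (1 : Int) + k))
        = (List.range (m + 1)).map (fun k => d n (m + 2 - k)) := by
      apply List.map_congr_left
      intro k hk
      have hk' : k < m + 1 := List.mem_range.1 hk
      simp only [Function.comp]
      have h4 : (4 + (m : Int) - 1 - (1 + (k : Int))).toNat = m + 2 - k := by omega
      rw [h4, hdp _ (by omega), if_pos (by omega)]
    rw [h3, part1_sum]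
  -- high rows: each contributes 1
  have hhigh : ((PySem.List.pyRange ((m : Int) + 2) n 1).map
        (fun row => if row ≥ 4 + (m : Int) - 2 then 1 else dp.getD (4 + (m : Int) - 1 - row).toNat 0)).sum
      = n - ((m : Int) + 2) := by
    have h1 : ((PySem.List.pyRange ((m : Int) + 2) n 1).map
          (fun row => if row ≥ 4 + (m : Int) - 2 then 1 else dp.getD (4 + (m : Int) - 1 - row).toNat 0))
        = (PySem.List.pyRange ((m : Int) + 2) n 1).map (fun _ => (1 : Int)) := by
      apply List.map_congr_left
      intro row hrow
      obtain ⟨h1, h2⟩ := (PySem.List.mem_pyRange_one).1 hrow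
      simp only [if_pos (by omega : row ≥ 4 + (m : Int) - 2)]
    rw [h1, PySem.List.sum_map_const_int, PySem.List.length_pyRange_one]
    have : ((n - ((m : Int) + 2)).toNat : Int) = n - ((m : Int) + 2) := Int.toNat_of_nonneg (by omega)
    rw [this, mul_one]
  rw [hlow, hhigh, hcur, d_rec]
  ring_nf

-- state of A's dp array after m outer iterations
lemma outer_inv (n : Int) (hn : 4 ≤ n) (m : Nat) (hm : (m : Int) ≤ n - 3) :
    (((List.range m).map (fun k : Nat => (4 : Int) + (k : Int))).foldl (outerBody n)
        (((List.replicate (n + 1).toNat (1 : Int)).set 2 2).set 3 3)).length = (n + 1).toNat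
    ∧ ∀ j, j < (n + 1).toNat →
      (((List.range m).map (fun k : Nat => (4 : Int) + (k : Int))).foldl (outerBody n)
        (((List.replicate (n + 1).toNat (1 : Int)).set 2 2).set 3 3)).getD j 0
      = if j ≤ m + 3 then d n j else 1 := by
  induction m with
  | zero =>
      refine ⟨by simp, ?_⟩
      intro j hj
      simp only [List.range_zero, List.map_nil, List.foldl_nil]
      by_cases h3 : j = 3
      · subst h3
        rw [getD_set_self _ _ _ (by simp; omega), if_pos (by omega)]
        simp [d, bfold]
      · rw [getD_set_ne _ _ _ _ h3]
        by_cases h2 : j = 2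
        · subst h2
          rw [getD_set_self _ _ _ (by simp; omega), if_pos (by omega)]
          simp [d]
        · rw [getD_set_ne _ _ _ _ h2]
          have hrep : (List.replicate (n + 1).toNat (1 : Int)).getD j 0 = 1 := by
            rw [List.getD_eq_getElem?_getD, List.getElem?_replicate, if_pos (by simpa using hj)]
            rfl
          rw [hrep]
          by_cases h01 : j ≤ 3
          · rw [if_pos (by omega)]
            simp only [d]
            rw [if_pos (show j ≤ 1 by omega)]
          · rw [if_neg (by omega)]
  | succ m ih =>
      have hm' : (m : Int) ≤ n - 3 := by push_cast at hm ⊢; omega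
      obtain ⟨ihlen, ihval⟩ := ih hm'
      rw [List.range_succ, List.map_append, List.foldl_append]
      simp only [List.map_cons, List.map_nil, List.foldl_cons, List.foldl_nil]
      rw [outer_step n hn m (by push_cast at hm; omega) _ ihval]
      constructor
      · rw [List.length_set]; exact ihlen
      · intro j hj
        by_cases hje : j = m + 4
        · subst hje
          rw [getD_set_self _ _ _ (by rw [ihlen]; omega), if_pos (by omega)]
        · rw [getD_set_ne _ _ _ _ hje, ihval j hj]
          by_cases hj3 : j ≤ m + 3
          · rw [if_pos hj3, if_pos (by omega)]
          · rw [if_neg hj3, if_neg (by omega)]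

-- B's fold is bfold
lemma foldB (n : Int) (m : Nat) :
    ((List.range m).map (fun k : Nat => (4 : Int) + (k : Int))).foldl
      (fun (st : Int × Int) i => (n - i + 3 + st.2, st.2 + st.1)) (3, 2) = bfold n m := by
  induction m with
  | zero => rfl
  | succ m ih =>
      rw [List.range_succ, List.map_append, List.foldl_append, ih]
      simp only [List.map_cons, List.map_nil, List.foldl_cons, List.foldl_nil, bfold]

-- ===== VERDICT (by name: the statement is the Claim_ definition above) =====
theorem func_spec : Claim_equal_func := by
  unfold Claim_equal_func Spec_func Pre_func
  intro n _ hn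
  by_cases h2 : n = 2
  · subst h2; decide
  by_cases h3 : n = 3
  · subst h3; decide
  have hn4 : 4 ≤ n := by omega
  have hM : ((n - 3).toNat : Int) = n - 3 := Int.toNat_of_nonneg (by omega)
  have hrange : PySem.List.pyRange 4 (n + 1) 1
      = (List.range (n - 3).toNat).map (fun k : Nat => (4 : Int) + (k : Int)) := by
    have h14 : (n + 1 - 4).toNat = (n - 3).toNat := by omega
    rw [PySem.List.pyRange_one, h14]
  -- evaluate A
  obtain ⟨hlen, hval⟩ := outer_inv n hn4 (n - 3).toNat (by omega)
  have hA : func n = d n n.toNat := by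
    simp only [func, if_pos (show 2 < n by omega)]
    rw [hrange, hval n.toNat (by omega), if_pos (by omega)]
  -- evaluate B
  have hB : func_alt n = d n n.toNat := by
    simp only [func_alt, if_neg (show ¬ (n ≤ 3) by omega)]
    rw [hrange, foldB, bfold_fst]
    congr 1
    omega
  rw [hA, hB]
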